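-- pv_equiv track=rewrite | github.com/tarunganesh2004/Leetcode | LC Mothly/2025/February/12th_feb.py | maximumSumUsingSorting
-- ===== SOURCE A (Python) =====
-- def maximumSumUsingSorting(nums):
--     digit_sum_pairs=[]
--     def calculate(num):
--         s=0
--         while num>0:
--             s+=num%10
--             num//=10
--         return s
--     for num in nums:
--         d=calculate(num)
--         digit_sum_pairs.append((d,num))
--     digit_sum_pairs.sort()
--     max_sum=-1
--     for idx in range(1,len(digit_sum_pairs)):
--         cur=digit_sum_pairs[idx][0]
--         prev=digit_sum_pairs[idx-1][0]
--         if cur==prev: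
--             cur=(digit_sum_pairs[idx][1]+digit_sum_pairs[idx-1][1])
--             max_sum=max(max_sum,cur)
--     return max_sum
-- ===== SOURCE B (Python) =====
-- def maximumSumUsingSorting(nums):
--     def digit_sum(num):
--         s = 0
--         while num > 0:
--             s += num % 10
--             num //= 10
--         return s
--     best = {}
--     max_sum = -1
--     for num in nums:
--         d = digit_sum(num)
--         b = best.get(d)
--         if b is None:
--             best[d] = num
--         else:
--             if b + num > max_sum:
--                 max_sum = b + num
--             if num > b:
--                 best[d] = num
--     return max_sum
-- ===== Notes on version B (the rewrite author's own statement) =====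
-- stated objective: faster
-- what changed: Replaced build-pairs + sort + adjacent-equal scan by a single pass that keeps, per digit sum, the largest value seen so far in a dict and maximizes stored+current on each repeat.
import Mathlib
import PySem

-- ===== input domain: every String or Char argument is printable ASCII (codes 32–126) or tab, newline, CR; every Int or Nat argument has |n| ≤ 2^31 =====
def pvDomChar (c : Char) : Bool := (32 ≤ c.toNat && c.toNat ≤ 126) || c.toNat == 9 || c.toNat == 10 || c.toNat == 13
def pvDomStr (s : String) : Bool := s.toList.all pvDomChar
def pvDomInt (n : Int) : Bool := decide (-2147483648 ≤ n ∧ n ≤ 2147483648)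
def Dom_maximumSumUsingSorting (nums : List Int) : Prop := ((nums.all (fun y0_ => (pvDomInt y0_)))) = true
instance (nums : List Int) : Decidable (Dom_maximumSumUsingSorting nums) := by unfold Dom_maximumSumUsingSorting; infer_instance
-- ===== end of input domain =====

-- B replaces A's build-pairs + sort + adjacent-equal scan by a single pass keeping the max value per
-- digit sum in a dict (objective: faster).

-- ===== PORT A =====
-- helper `calculate`: s = 0; while num > 0: s += num % 10; num //= 10 (accumulator s)
def digitSumLoop (num s : Int) : Int :=
  if 0 < num then digitSumLoop (PySem.Int.floordiv num 10) (s + PySem.Int.mod num 10)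
  else s
termination_by num.toNat
decreasing_by
  rw [PySem.Int.floordiv_eq_ediv_of_pos (by norm_num)]
  omega

def maximumSumUsingSorting (nums : List Int) : Int :=
  let digit_sum_pairs := nums.foldl (fun acc num => acc ++ [(digitSumLoop num 0, num)]) ([] : List (Int × Int))
  let sp := PySem.List.sorted2 digit_sum_pairs Prod.fst Prod.snd
  -- the index loop: every pyGetD index is in range, so the default (0, 0) is never read
  (PySem.List.pyRange 1 (sp.length : Int) 1).foldl (fun max_sum idx =>
    if (PySem.List.pyGetD sp idx ((0 : Int), (0 : Int))).1
        = (PySem.List.pyGetD sp (idx - 1) ((0 : Int), (0 : Int))).1 then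
      max max_sum ((PySem.List.pyGetD sp idx ((0 : Int), (0 : Int))).2
        + (PySem.List.pyGetD sp (idx - 1) ((0 : Int), (0 : Int))).2)
    else max_sum) (-1)

-- ===== PORT B =====
-- loop body of Source B: d = digit_sum(num); b = best.get(d); update best / max_sum
def altStep (st : PySem.Dict Int Int × Int) (num : Int) : PySem.Dict Int Int × Int :=
  let d := digitSumLoop num 0
  match st.1.get? d with
  | none => (st.1.insert d num, st.2)
  | some b =>
    (if num > b then st.1.insert d num else st.1,
     if b + num > st.2 then b + num else st.2)

def maximumSumUsingSorting_alt (nums : List Int) : Int :=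
  (nums.foldl altStep (PySem.Dict.empty, -1)).2

-- ===== PRECONDITION & SPEC =====
def Spec_maximumSumUsingSorting (nums : List Int) (out : Int) : Prop := out = maximumSumUsingSorting_alt nums
instance (nums : List Int) (out : Int) : Decidable (Spec_maximumSumUsingSorting nums out) := by unfold Spec_maximumSumUsingSorting; infer_instance

-- ===== CLAIM (what is proved, stated in full; the proofs are below) =====
def Claim_equal_maximumSumUsingSorting : Prop := ∀ (nums : List Int), Dom_maximumSumUsingSorting nums → Spec_maximumSumUsingSorting nums (maximumSumUsingSorting nums)

-- ===== LEMMAS AND PROOFS =====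

-- max of a list relative to a base, with none for the empty list
def omax : List Int → Option Int
  | [] => none
  | x :: t => some (t.foldl max x)

-- all candidate sums "later + earlier" over pairs with equal first component
def cands : List (Int × Int) → List Int
  | [] => []
  | a :: t => (t.filter (fun c => c.1 == a.1)).map (fun c => c.2 + a.2) ++ cands t

-- candidate sums of ADJACENT equal-key pairs
def adjCands : List (Int × Int) → List Int
  | a :: b :: t => (if b.1 = a.1 then [b.2 + a.2] else []) ++ adjCands (b :: t)
  | _ => []

-- A's scan as structural recursion over the list
def adjScan : Int → List (Int × Int) → Int
  | m, a :: b :: t => adjScan (if b.1 = a.1 then max m (b.2 + a.2) else m) (b :: t)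
  | m, _ => m

def LexLE (a b : Int × Int) : Prop := a.1 < b.1 ∨ (a.1 = b.1 ∧ a.2 ≤ b.2)

-- upper bound for a running max
theorem foldl_max_le_of (l : List Int) (m c : Int) (h : m ≤ c) (h2 : ∀ x ∈ l, x ≤ c) :
    l.foldl max m ≤ c := by
  induction l generalizing m with
  | nil => exact h
  | cons x t ih =>
    exact ih (max m x) (max_le h (h2 x (by simp))) (fun y hy => h2 y (by simp [hy]))

theorem foldl_max_eq_of (s t : List Int) (hsub : ∀ x ∈ s, x ∈ t)
    (hdom : ∀ x ∈ t, ∃ y ∈ s, x ≤ y) (m : Int) : s.foldl max m = t.foldl max m := by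
  apply le_antisymm
  · exact foldl_max_le_of s m _ (PySem.List.le_foldl_max t m).1
      (fun x hx => (PySem.List.le_foldl_max t m).2 x (hsub x hx))
  · refine foldl_max_le_of t m _ (PySem.List.le_foldl_max s m).1 ?_
    intro x hx
    obtain ⟨y, hy, hxy⟩ := hdom x hx
    exact le_trans hxy ((PySem.List.le_foldl_max s m).2 y hy)

theorem cands_perm {l l' : List (Int × Int)} (h : l.Perm l') : (cands l).Perm (cands l') := by
  induction h with
  | nil => simp [cands]
  | cons x h ih =>
    simp only [cands]
    exact (h.filter _ |>.map _).append ih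
  | swap x y t =>
    by_cases hxy : x.1 = y.1
    · simp only [cands, List.filter_cons, hxy, beq_self_eq_true, if_true, List.map_cons,
        List.cons_append]
      rw [Int.add_comm x.2 y.2]
      exact List.Perm.cons _ (List.perm_append_comm_assoc _ _ _)
    · have hyx : ¬(y.1 = x.1) := fun h => hxy h.symm
      simp only [cands, List.filter_cons, beq_iff_eq, hxy, hyx, if_false]
      exact List.perm_append_comm_assoc _ _ _
  | trans h1 h2 ih1 ih2 => exact ih1.trans ih2

theorem cands_snoc (P : List (Int × Int)) (a : Int × Int) :
    (cands (P ++ [a])).Perm (cands P ++ (P.filter (fun p => p.1 == a.1)).map (fun p => a.2 + p.2)) := by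
  induction P with
  | nil => simp [cands]
  | cons x P' ih =>
    simp only [cands, List.cons_append, List.filter_append, List.filter_cons, List.map_append,
      List.filter_nil, List.append_assoc]
    by_cases hax : a.1 = x.1
    · simp only [beq_iff_eq, hax, if_true, List.map_cons,
        List.cons_append]
      simp only [hax] at ih
      refine List.Perm.append_left _ ?_
      exact (ih.cons _).trans List.perm_middle.symm
    · have hxa : ¬(x.1 = a.1) := fun h => hax h.symm
      simp only [beq_iff_eq, hax, hxa, if_false, List.map_nil]
      exact List.Perm.append_left _ ih

theorem adjScan_eq_foldl (l : List (Int × Int)) (m : Int) :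
    adjScan m l = (adjCands l).foldl max m := by
  induction l generalizing m with
  | nil => simp [adjScan, adjCands]
  | cons a t ih =>
    cases t with
    | nil => simp [adjScan, adjCands]
    | cons b t' =>
      by_cases h : b.1 = a.1 <;> simp [adjScan, adjCands, h, ih]

theorem adj_sub (l : List (Int × Int)) : ∀ x ∈ adjCands l, x ∈ cands l := by
  induction l with
  | nil => simp [adjCands]
  | cons a t ih =>
    cases t with
    | nil => simp [adjCands]
    | cons b t' =>
      intro x hx
      simp only [adjCands, List.mem_append] at hx
      rcases hx with hx | hx
      · by_cases h : b.1 = a.1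
        · rw [if_pos h, List.mem_singleton] at hx
          subst hx
          refine List.mem_append_left _ (List.mem_map.2 ⟨b, ?_, rfl⟩)
          simp [List.mem_filter, h]
        · rw [if_neg h] at hx
          simp at hx
      · exact List.mem_append_right _ (ih x hx)

theorem cands_dom (l : List (Int × Int)) (hs : l.Pairwise LexLE) :
    ∀ x ∈ cands l, ∃ y ∈ adjCands l, x ≤ y := by
  induction l with
  | nil => simp [cands]
  | cons a t ih =>
    rcases hs with _ | ⟨ha, ht⟩
    intro x hx
    rcases List.mem_append.1 hx with hx | hx
    · obtain ⟨c, hcf, rfl⟩ := List.mem_map.1 hx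
      have hcmem : c ∈ t := (List.mem_filter.1 hcf).1
      have hca : c.1 = a.1 := by
        have := (List.mem_filter.1 hcf).2
        simpa using this
      cases t with
      | nil => simp at hcmem
      | cons b t' =>
        have hab : LexLE a b := ha b (by simp)
        have hba : b.1 = a.1 := by
          rcases List.mem_cons.1 hcmem with rfl | hct'
          · exact hca
          · have hbc : LexLE b c := (List.pairwise_cons.1 ht).1 c hct'
            rcases hab with h | ⟨h, _⟩ <;> rcases hbc with h2 | ⟨h2, _⟩ <;> omega
        have ha2b2 : a.2 ≤ b.2 := by
          rcases hab with h | ⟨_, h⟩ <;> omega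
        have hy0 : b.2 + a.2 ∈ adjCands (a :: b :: t') := by
          simp [adjCands, hba]
        rcases List.mem_cons.1 hcmem with rfl | hct'
        · exact ⟨c.2 + a.2, hy0, le_refl _⟩
        · have hcb : c.2 + b.2 ∈ cands (b :: t') := by
            refine List.mem_append_left _ (List.mem_map.2 ⟨c, ?_, rfl⟩)
            simp [List.mem_filter, hct', hca, hba]
          obtain ⟨y, hy, hle⟩ := ih ht (c.2 + b.2) hcb
          exact ⟨y, List.mem_append_right _ hy, by omega⟩
    · cases t with
      | nil => simp [cands] at hx
      | cons b t' =>
        obtain ⟨y, hy, hle⟩ := ih ht x hx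
        exact ⟨y, List.mem_append_right _ hy, hle⟩

-- the index loop of A is adjScan
theorem scan_aux (l : List (Int × Int)) (n : Nat) : ∀ (j : Nat) (m : Int), l.length - j = n →
    (PySem.List.pyRange ((j : Int) + 1) (l.length : Int) 1).foldl (fun max_sum idx =>
      if (PySem.List.pyGetD l idx ((0 : Int), (0 : Int))).1
          = (PySem.List.pyGetD l (idx - 1) ((0 : Int), (0 : Int))).1 then
        max max_sum ((PySem.List.pyGetD l idx ((0 : Int), (0 : Int))).2
          + (PySem.List.pyGetD l (idx - 1) ((0 : Int), (0 : Int))).2)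
      else max_sum) m = adjScan m (l.drop j) := by
  induction n with
  | zero =>
    intro j m h
    rw [PySem.List.pyRange_one_eq_nil (by omega), List.drop_eq_nil_of_le (by omega)]
    simp [adjScan]
  | succ k ih =>
    intro j m h
    have hj : j < l.length := by omega
    by_cases hj1 : j + 1 = l.length
    · rw [show ((j : Int) + 1) = (l.length : Int) by omega, PySem.List.pyRange_one_eq_nil le_rfl]
      rw [List.drop_eq_getElem_cons hj, List.drop_eq_nil_of_le (by omega)]
      simp [adjScan]
    · have hj2 : j + 1 < l.length := by omega
      rw [PySem.List.pyRange_one_cons (by omega), List.foldl_cons]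
      have e1 : PySem.List.pyGetD l ((j : Int) + 1) ((0 : Int), (0 : Int)) = l[j + 1] := by
        rw [show ((j : Int) + 1) = ((j + 1 : Nat) : Int) by omega, PySem.List.pyGetD_natCast,
          List.getD_eq_getElem _ _ hj2]
      have e2 : PySem.List.pyGetD l ((j : Int) + 1 - 1) ((0 : Int), (0 : Int)) = l[j] := by
        rw [show ((j : Int) + 1 - 1) = ((j : Nat) : Int) by omega, PySem.List.pyGetD_natCast,
          List.getD_eq_getElem _ _ hj]
      rw [e1, e2]
      have hrec := ih (j + 1) (if l[j + 1].1 = l[j].1 then max m (l[j + 1].2 + l[j].2) else m) (by omega)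
      rw [show ((j + 1 : Nat) : Int) + 1 = (j : Int) + 1 + 1 by omega] at hrec
      rw [hrec, List.drop_eq_getElem_cons hj, List.drop_eq_getElem_cons hj2]
      simp [adjScan]

-- sorted2 on pairs is sorted with the lexicographic key
theorem sorted2_eq_sorted_lex (xs : List (Int × Int)) :
    PySem.List.sorted2 xs Prod.fst Prod.snd = PySem.List.sorted xs (fun p => toLex p) := by
  rw [PySem.List.sorted_eq_foldl_insertBy]
  show List.foldl (fun acc x => PySem.List.insertBy _ x acc) [] xs = _
  congr 1
  funext acc x
  congr 1
  funext a b
  by_cases h1 : a.1 < b.1 <;> by_cases h2 : b.1 < a.1 <;> by_cases h3 : a.2 < b.2 <;>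
    simp [h1, h2, h3, Prod.Lex.lt_iff] <;> omega

theorem sorted_lex_pairwise (xs : List (Int × Int)) :
    (PySem.List.sorted xs (fun p : Int × Int => toLex p)).Pairwise LexLE := by
  refine (PySem.List.sorted_pairwise xs (fun p : Int × Int => toLex p)).imp ?_
  intro a b h
  rw [Prod.Lex.le_iff] at h
  exact h

theorem omax_append_singleton (l : List Int) (y : Int) :
    omax (l ++ [y]) = some (match omax l with | none => y | some m => max m y) := by
  cases l with
  | nil => simp [omax]
  | cons x t => simp [omax, List.foldl_append]

theorem foldl_max_map_add (t : List Int) (x c : Int) :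
    (t.map (fun v => c + v)).foldl max (c + x) = c + t.foldl max x := by
  induction t generalizing x with
  | nil => simp
  | cons y t' ih =>
    rw [List.map_cons, List.foldl_cons, List.foldl_cons, Int.max_add_left]
    exact ih (max x y)

theorem foldl_max_map_add_of_omax (vals : List Int) (b c m : Int) (h : omax vals = some b) :
    (vals.map (fun v => c + v)).foldl max m = max m (c + b) := by
  cases vals with
  | nil => simp [omax] at h
  | cons x t =>
    simp only [omax, Option.some.injEq] at h
    subst h
    rw [List.map_cons, List.foldl_cons, List.foldl_assoc, foldl_max_map_add]

theorem M_snoc (P : List (Int × Int)) (a : Int × Int) :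
    (cands (P ++ [a])).foldl max (-1)
      = ((P.filter (fun p => p.1 == a.1)).map (fun p => a.2 + p.2)).foldl max
          ((cands P).foldl max (-1)) := by
  rw [(cands_snoc P a).foldl_eq, List.foldl_append]

-- B's invariant-carrying fold
theorem B_inv (nums : List Int) : ∀ (P : List (Int × Int)) (best : PySem.Dict Int Int) (m : Int),
    (∀ d, best.get? d = omax ((P.filter (fun p => p.1 == d)).map Prod.snd)) →
    m = (cands P).foldl max (-1) →
    (nums.foldl altStep (best, m)).2 = (cands (P ++ nums.map (fun n => (digitSumLoop n 0, n)))).foldl max (-1) := by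
  induction nums with
  | nil =>
    intro P best m _ hm
    simpa using hm
  | cons num rest ih =>
    intro P best m hinv hm
    rw [List.foldl_cons, List.map_cons,
      show P ++ ((digitSumLoop num 0, num) :: rest.map (fun n => (digitSumLoop n 0, n)))
        = (P ++ [(digitSumLoop num 0, num)]) ++ rest.map (fun n => (digitSumLoop n 0, n)) by
          simp [List.append_assoc]]
    set d := digitSumLoop num 0 with hd
    set a : Int × Int := (d, num) with hadef
    have hfilter : ∀ d' : Int, (P ++ [a]).filter (fun p => p.1 == d')
        = P.filter (fun p => p.1 == d') ++ (if d = d' then [a] else []) := by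
      intro d'
      rw [List.filter_append]
      congr 1
      by_cases hdd : d = d' <;> simp [hadef, hdd]
    cases hb : best.get? d with
    | none =>
      have hvals : (P.filter (fun p => p.1 == d)).map Prod.snd = [] := by
        have := (hinv d).symm.trans hb
        cases hv : (P.filter (fun p => p.1 == d)).map Prod.snd with
        | nil => rfl
        | cons z zs => rw [hv] at this; simp [omax] at this
      have hPd : P.filter (fun p => p.1 == d) = [] := by
        simpa using hvals
      have hstep : altStep (best, m) num = (best.insert d num, m) := by
        simp only [altStep, ← hd]
        rw [hb]
      rw [hstep]
      refine ih (P ++ [a]) _ m ?_ ?_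
      · intro d'
        rw [PySem.Dict.get?_insert, hfilter d']
        by_cases hdd : d' = d
        · subst hdd
          simp [hPd, omax, hadef]
        · have : ¬ (d = d') := fun h => hdd h.symm
          simp only [if_neg hdd, if_neg this, List.append_nil]
          exact hinv d'
      · rw [M_snoc, hadef]
        rw [show (P.filter (fun p => p.1 == d)).map (fun p => (d, num).2 + p.2)
            = ((P.filter (fun p => p.1 == d)).map Prod.snd).map (fun v => num + v) by
          rw [List.map_map]; rfl]
        rw [hvals]
        simpa using hm
    | some b =>
      have homax : omax ((P.filter (fun p => p.1 == d)).map Prod.snd) = some b :=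
        (hinv d).symm.trans hb
      have hstep : altStep (best, m) num
          = (if num > b then best.insert d num else best,
             if b + num > m then b + num else m) := by
        simp only [altStep, ← hd]
        rw [hb]
      rw [hstep]
      refine ih (P ++ [a]) _ _ ?_ ?_
      · intro d'
        rw [hfilter d']
        by_cases hdd : d' = d
        · subst hdd
          rw [if_pos rfl, List.map_append,
            show ([a].map Prod.snd) = [num] from rfl, omax_append_singleton, homax]
          rw [show (match (some b : Option Int) with | none => (num : Int) | some m => max m num)
              = max b num from rfl]
          by_cases hnb : num > b
          · rw [if_pos hnb, PySem.Dict.get?_insert, if_pos rfl]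
            congr 1
            omega
          · rw [if_neg hnb, hb]
            congr 1
            omega
        · have hne : ¬ (d = d') := fun h => hdd h.symm
          rw [if_neg hne, List.append_nil]
          by_cases hnb : num > b
          · rw [if_pos hnb, PySem.Dict.get?_insert, if_neg hdd]
            exact hinv d'
          · rw [if_neg hnb]
            exact hinv d'
      · rw [M_snoc, hadef]
        rw [show (P.filter (fun p => p.1 == d)).map (fun p => (d, num).2 + p.2)
            = ((P.filter (fun p => p.1 == d)).map Prod.snd).map (fun v => num + v) by
          rw [List.map_map]; rfl]
        rw [foldl_max_map_add_of_omax _ b num _ homax, ← hm]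
        split_ifs <;> omega

theorem A_eq (nums : List Int) : maximumSumUsingSorting nums
    = (cands (nums.map (fun n => (digitSumLoop n 0, n)))).foldl max (-1) := by
  have hpairs : nums.foldl (fun acc num => acc ++ [(digitSumLoop num 0, num)]) ([] : List (Int × Int))
      = nums.map (fun n => (digitSumLoop n 0, n)) := by
    simpa using PySem.List.foldl_append_singleton_eq_map (fun n => (digitSumLoop n 0, n)) nums []
  unfold maximumSumUsingSorting
  simp only [hpairs, sorted2_eq_sorted_lex]
  have h0 := scan_aux (PySem.List.sorted (nums.map fun n => (digitSumLoop n 0, n))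
      (fun p => toLex p)) ((PySem.List.sorted (nums.map fun n => (digitSumLoop n 0, n))
      (fun p => toLex p)).length) 0 (-1) (by omega)
  norm_num at h0
  simp only [PySem.List.length_sorted, List.length_map]
  rw [h0, adjScan_eq_foldl,
    foldl_max_eq_of (adjCands _) (cands _) (adj_sub _) (cands_dom _ (sorted_lex_pairwise _)) (-1)]
  exact (cands_perm (PySem.List.sorted_perm _ _ _)).foldl_eq (-1)

theorem B_eq (nums : List Int) : maximumSumUsingSorting_alt nums
    = (cands (nums.map (fun n => (digitSumLoop n 0, n)))).foldl max (-1) := by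
  unfold maximumSumUsingSorting_alt
  have h := B_inv nums [] PySem.Dict.empty (-1)
    (by intro d; simp [PySem.Dict.get?_empty, omax])
    (by simp [cands])
  simpa using h

-- ===== VERDICT (by name: the statement is the Claim_ definition above) =====
theorem maximumSumUsingSorting_spec : Claim_equal_maximumSumUsingSorting := by
  intro nums _
  show _ = _
  rw [A_eq, B_eq]
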